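-- pv_equiv track=rewrite | github.com/gsrkreddy95-ops/audit-ai-agent | evidence_manager/evidence_analyzer.py | _detect_data_type_from_columns
-- ===== SOURCE A (Python) =====
-- from typing import List, Dict, Optional, Any
--
-- def _detect_data_type_from_columns(columns: List[str]) -> str:
--     """Detect data type from Excel/CSV columns"""
--     columns_lower = [col.lower() for col in columns]
--
--     if any('user' in col for col in columns_lower):
--         if any('mfa' in col or 'accesskey' in col for col in columns_lower):
--             return 'iam_users'
--
--     if any('instance' in col for col in columns_lower):
--         if any('db' in col or 'cluster' in col for col in columns_lower):
--             return 'rds_instances'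
--         else:
--             return 'ec2_instances'
--
--     if any('bucket' in col for col in columns_lower):
--         return 's3_buckets'
--
--     if any('incident' in col for col in columns_lower):
--         return 'incidents'
--
--     return 'unknown'
-- ===== SOURCE B (Python) =====
-- def _detect_data_type_from_columns(columns):
--     """Detect data type from Excel/CSV columns: one pass setting flags, then priority cascade."""
--     has_user = has_mfa = has_instance = has_db = has_bucket = has_incident = False
--     for col in columns:
--         c = col.lower()
--         has_user = has_user or 'user' in c
--         has_mfa = has_mfa or 'mfa' in c or 'accesskey' in c
--         has_instance = has_instance or 'instance' in c
--         has_db = has_db or 'db' in c or 'cluster' in c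
--         has_bucket = has_bucket or 'bucket' in c
--         has_incident = has_incident or 'incident' in c
--     if has_user and has_mfa:
--         return 'iam_users'
--     if has_instance:
--         return 'rds_instances' if has_db else 'ec2_instances'
--     if has_bucket:
--         return 's3_buckets'
--     if has_incident:
--         return 'incidents'
--     return 'unknown'
-- ===== Notes on version B (the rewrite author's own statement) =====
-- stated objective: simpler
-- what changed: Replaces the up-to-six independent any()-scans over the lowered column list with a single pass that lowers each column once and accumulates six boolean flags, followed by the same priority cascade on the flags.
import Mathlib
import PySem

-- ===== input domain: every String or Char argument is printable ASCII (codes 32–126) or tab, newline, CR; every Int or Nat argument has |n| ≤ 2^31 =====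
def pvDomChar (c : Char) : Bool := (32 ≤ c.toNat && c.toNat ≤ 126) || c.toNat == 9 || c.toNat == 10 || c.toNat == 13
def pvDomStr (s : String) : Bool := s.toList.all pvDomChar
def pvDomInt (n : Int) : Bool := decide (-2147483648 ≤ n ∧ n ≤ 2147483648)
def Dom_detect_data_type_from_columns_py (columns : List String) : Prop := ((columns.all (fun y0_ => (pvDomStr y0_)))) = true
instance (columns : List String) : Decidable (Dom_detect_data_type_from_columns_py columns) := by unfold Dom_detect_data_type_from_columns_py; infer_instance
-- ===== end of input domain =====

-- B replaces A's six independent any()-scans with one pass accumulating boolean flags, then the same priority cascade (objective: simpler).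

-- ===== PORT A =====
def detect_data_type_from_columns_py (columns : List String) : String :=
  let columns_lower := columns.map (fun col => PySem.Str.lower col)
  if columns_lower.any (fun col => PySem.Str.isIn "user" col) &&
     columns_lower.any (fun col => PySem.Str.isIn "mfa" col || PySem.Str.isIn "accesskey" col) then
    "iam_users"
  else if columns_lower.any (fun col => PySem.Str.isIn "instance" col) then
    if columns_lower.any (fun col => PySem.Str.isIn "db" col || PySem.Str.isIn "cluster" col) then
      "rds_instances"
    else
      "ec2_instances"
  else if columns_lower.any (fun col => PySem.Str.isIn "bucket" col) then
    "s3_buckets"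
  else if columns_lower.any (fun col => PySem.Str.isIn "incident" col) then
    "incidents"
  else
    "unknown"

-- ===== PORT B =====
-- one pass: lower each column once, accumulate six boolean flags, then the priority cascade
def dtAltStep (f : Bool × Bool × Bool × Bool × Bool × Bool) (col : String) :
    Bool × Bool × Bool × Bool × Bool × Bool :=
  let c := PySem.Str.lower col
  (f.1 || PySem.Str.isIn "user" c,
   f.2.1 || PySem.Str.isIn "mfa" c || PySem.Str.isIn "accesskey" c,
   f.2.2.1 || PySem.Str.isIn "instance" c,
   f.2.2.2.1 || PySem.Str.isIn "db" c || PySem.Str.isIn "cluster" c,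
   f.2.2.2.2.1 || PySem.Str.isIn "bucket" c,
   f.2.2.2.2.2 || PySem.Str.isIn "incident" c)

def detect_data_type_from_columns_py_alt (columns : List String) : String :=
  let f := columns.foldl dtAltStep (false, false, false, false, false, false)
  if f.1 && f.2.1 then "iam_users"
  else if f.2.2.1 then
    if f.2.2.2.1 then "rds_instances" else "ec2_instances"
  else if f.2.2.2.2.1 then "s3_buckets"
  else if f.2.2.2.2.2 then "incidents"
  else "unknown"

-- ===== PRECONDITION & SPEC =====
def Spec_detect_data_type_from_columns_py (columns : List String) (out : String) : Prop := out = detect_data_type_from_columns_py_alt columns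
instance (columns : List String) (out : String) : Decidable (Spec_detect_data_type_from_columns_py columns out) := by unfold Spec_detect_data_type_from_columns_py; infer_instance

-- ===== CLAIM (what is proved, stated in full; the proofs are below) =====
def Claim_equal_detect_data_type_from_columns_py : Prop := ∀ (columns : List String), Dom_detect_data_type_from_columns_py columns → Spec_detect_data_type_from_columns_py columns (detect_data_type_from_columns_py columns)

-- ===== LEMMAS AND PROOFS =====
lemma dtAlt_foldl (columns : List String) (f : Bool × Bool × Bool × Bool × Bool × Bool) :
    columns.foldl dtAltStep f =
      (f.1 || columns.any (fun col => PySem.Str.isIn "user" (PySem.Str.lower col)),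
       f.2.1 || columns.any (fun col => PySem.Str.isIn "mfa" (PySem.Str.lower col) || PySem.Str.isIn "accesskey" (PySem.Str.lower col)),
       f.2.2.1 || columns.any (fun col => PySem.Str.isIn "instance" (PySem.Str.lower col)),
       f.2.2.2.1 || columns.any (fun col => PySem.Str.isIn "db" (PySem.Str.lower col) || PySem.Str.isIn "cluster" (PySem.Str.lower col)),
       f.2.2.2.2.1 || columns.any (fun col => PySem.Str.isIn "bucket" (PySem.Str.lower col)),
       f.2.2.2.2.2 || columns.any (fun col => PySem.Str.isIn "incident" (PySem.Str.lower col))) := by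
  induction columns generalizing f with
  | nil => simp
  | cons c cs ih =>
    simp only [List.foldl_cons, List.any_cons, ih, dtAltStep]
    cases f with
    | mk a r =>
      simp only []
      refine Prod.ext ?_ (Prod.ext ?_ (Prod.ext ?_ (Prod.ext ?_ (Prod.ext ?_ ?_)))) <;>
        simp [Bool.or_assoc]


-- ===== VERDICT (by name: the statement is the Claim_ definition above) =====
theorem detect_data_type_from_columns_py_spec : Claim_equal_detect_data_type_from_columns_py := by
  intro columns _
  unfold Spec_detect_data_type_from_columns_py detect_data_type_from_columns_py
    detect_data_type_from_columns_py_alt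
  simp only [dtAlt_foldl, Bool.false_or, List.any_map, Function.comp_def]
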